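-- pv_equiv track=rewrite | github.com/chavicoski/Splicing-Systems-Analyzer | sh_automata.py | get_max_firm_subwords
-- ===== SOURCE A (Python) =====
-- def get_max_firm_subwords(I, R):
--     '''Returns a list of strings
--     Given a list of words and a list of splicing rules finds the
--     maximal firm subwords and returns them in a list.
--     Params:
--         I -> List with the words to extract the maximal firm subwords
--         R -> list of rules with the symbols where we make the splicing
--     '''
--     max_firms = []
--     for word in I:
--         firm = ""
--         for symbol in word:
--             if symbol not in R:
--                 firm += symbol
--             else:
--                 max_firms.append(firm)
--                 firm = ""
--
--         max_firms.append(firm)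
--
--     return max_firms
-- ===== SOURCE B (Python) =====
-- def _cut_points(word, seps):
--     '''Positions of the splicing symbols in word.'''
--     return [i for i, ch in enumerate(word) if ch in seps]
--
-- def get_max_firm_subwords(I, R):
--     '''Two-stage split: first locate every splicing position in each word,
--     then extract the firm subwords between consecutive positions by slicing.'''
--     seps = set(R)
--     out = []
--     for word in I:
--         cuts = _cut_points(word, seps)
--         bounds = zip([-1] + cuts, cuts + [len(word)])
--         out.extend(word[lo + 1:hi] for lo, hi in bounds)
--     return out
-- ===== Notes on version B (the rewrite author's own statement) =====
-- stated objective: faster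
-- what changed: B replaces A's single char-by-char scan with a running string accumulator and a linear search of R per character by a two-stage split: it builds set(R) once, first computes the list of splicing positions per word (enumerate + comprehension), then extracts the firm subwords by slicing between consecutive positions via zip of the shifted position lists.
import Mathlib
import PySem

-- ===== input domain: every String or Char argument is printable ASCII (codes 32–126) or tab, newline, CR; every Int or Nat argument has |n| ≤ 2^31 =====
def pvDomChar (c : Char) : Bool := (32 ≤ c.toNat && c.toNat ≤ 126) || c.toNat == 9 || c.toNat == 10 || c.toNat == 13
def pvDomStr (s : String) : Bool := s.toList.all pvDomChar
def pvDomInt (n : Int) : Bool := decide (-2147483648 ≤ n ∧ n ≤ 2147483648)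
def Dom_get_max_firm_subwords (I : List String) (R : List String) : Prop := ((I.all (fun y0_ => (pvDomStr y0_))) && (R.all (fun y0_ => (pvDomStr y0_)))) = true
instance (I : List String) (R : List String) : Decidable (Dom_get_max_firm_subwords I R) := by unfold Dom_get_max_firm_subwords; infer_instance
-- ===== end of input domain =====

-- B splits each word in two stages — first the list of splicing positions, then slices
-- between consecutive positions — instead of A's char-by-char accumulator with a linear
-- search of R per character (objective: faster; same return value).


-- ===== PORT A =====
-- Literal port of A. Python iterates a word's characters as 1-char strings; the running
-- string `firm` is kept as its character list (Python's `firm += symbol` is exact as list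
-- append; it is turned into a String exactly where A appends `firm` to `max_firms`).
def get_max_firm_subwords (I : List String) (R : List String) : List String :=
  I.foldl (fun max_firms word =>
    let st := word.toList.foldl
      (fun (st : List String × List Char) symbol =>
        if ¬ (String.ofList [symbol] ∈ R) then (st.1, st.2 ++ [symbol])
        else (st.1 ++ [String.ofList st.2], []))
      (max_firms, [])
    st.1 ++ [String.ofList st.2]) []

-- ===== PORT B =====
-- helper of Source B: _cut_points(word, seps) = [i for i, ch in enumerate(word) if ch in seps]
def pvCutPointsB (seps : PySem.Set String) (w : List Char) : List Int :=
  ((PySem.List.enumerate w).filter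
    (fun p => PySem.Set.contains seps (String.ofList [p.2]))).map (·.1)

-- Source B: seps = set(R); per word: bounds = zip([-1]+cuts, cuts+[len(word)]);
-- out.extend(word[lo+1:hi] for lo, hi in bounds)
def get_max_firm_subwords_alt (I : List String) (R : List String) : List String :=
  let seps := PySem.Set.ofList R
  I.foldl (fun out word =>
    let w := word.toList
    let cuts := pvCutPointsB seps w
    let bounds := List.zip (-1 :: cuts) (cuts ++ [PySem.Str.len word])
    out ++ bounds.map (fun lohi =>
      String.ofList (PySem.List.slice w (some (lohi.1 + 1)) (some lohi.2)))) []

-- ===== PRECONDITION & SPEC =====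
def Spec_get_max_firm_subwords (I : List String) (R : List String) (out : List String) : Prop := out = get_max_firm_subwords_alt I R
instance (I : List String) (R : List String) (out : List String) : Decidable (Spec_get_max_firm_subwords I R out) := by unfold Spec_get_max_firm_subwords; infer_instance

-- ===== CLAIM (what is proved, stated in full; the proofs are below) =====
def Claim_equal_get_max_firm_subwords : Prop := ∀ (I : List String) (R : List String), Dom_get_max_firm_subwords I R → Spec_get_max_firm_subwords I R (get_max_firm_subwords I R)

-- ===== LEMMAS AND PROOFS =====

-- A's inner step, named for the proofs
def pvStepA (R : List String) (st : List String × List Char) (symbol : Char) : List String × List Char :=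
  if ¬ (String.ofList [symbol] ∈ R) then (st.1, st.2 ++ [symbol])
  else (st.1 ++ [String.ofList st.2], [])

-- canonical split of a word into firm pieces (proof-side reference function)
def pvSplitF (R : List String) : List Char → List (List Char)
  | [] => [[]]
  | c :: cs =>
    if String.ofList [c] ∈ R then [] :: pvSplitF R cs
    else
      match pvSplitF R cs with
      | [] => [[c]]
      | p :: ps => (c :: p) :: ps

theorem pvSplitF_ne_nil (R : List String) (w : List Char) : pvSplitF R w ≠ [] := by
  induction w with
  | nil => simp [pvSplitF]
  | cons c cs ih =>
    simp only [pvSplitF]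
    split_ifs
    · simp
    · cases h : pvSplitF R cs <;> simp

-- positions (from offset k) of the separator characters, proof-side twin of _cut_points
def pvIdx (R : List String) : Nat → List Char → List Int
  | _, [] => []
  | k, c :: cs =>
    if String.ofList [c] ∈ R then (k : Int) :: pvIdx R (k + 1) cs else pvIdx R (k + 1) cs

-- prepend to the head piece of a split
def pvCons (p : List Char) : List (List Char) → List (List Char)
  | [] => [p]
  | q :: qs => (p ++ q) :: qs

-- Source B's comprehension computes pvIdx
theorem pvCuts_eq (R : List String) (w : List Char) :
    ∀ (k : Nat),
      ((PySem.List.enumerate w (k : Int)).filter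
        (fun p => PySem.Set.contains (PySem.Set.ofList R) (String.ofList [p.2]))).map (·.1)
        = pvIdx R k w := by
  induction w with
  | nil => intro k; simp [PySem.List.enumerate_nil, pvIdx]
  | cons c cs ih =>
    intro k
    rw [PySem.List.enumerate_cons]
    have hcast : (k : Int) + 1 = ((k + 1 : Nat) : Int) := by push_cast; ring
    rw [hcast]
    by_cases hc : String.ofList [c] ∈ R
    · rw [List.filter_cons_of_pos (by simp [PySem.Set.contains, PySem.Set.mem_ofList, hc])]
      rw [List.map_cons, ih (k + 1)]
      simp [pvIdx, hc]
    · rw [List.filter_cons_of_neg (by simp [PySem.Set.contains, PySem.Set.mem_ofList, hc])]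
      rw [ih (k + 1)]
      simp [pvIdx, hc]

-- A's inner loop computes the canonical split, prefixed by the pending firm piece
theorem pvA_inner (R : List String) (w : List Char) :
    ∀ (acc : List String) (firm : List Char) (p : List Char) (ps : List (List Char)),
      pvSplitF R w = p :: ps →
      (w.foldl (pvStepA R) (acc, firm)).1 ++ [String.ofList (w.foldl (pvStepA R) (acc, firm)).2]
        = acc ++ String.ofList (firm ++ p) :: ps.map String.ofList := by
  induction w with
  | nil =>
    intro acc firm p ps h
    simp [pvSplitF] at h
    obtain ⟨hp, hps⟩ := h
    subst hp; subst hps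
    simp
  | cons c cs ih =>
    intro acc firm p ps h
    obtain ⟨q, qs, hq⟩ := List.exists_cons_of_ne_nil (pvSplitF_ne_nil R cs)
    by_cases hc : String.ofList [c] ∈ R
    · simp only [pvSplitF, if_pos hc, hq] at h
      obtain ⟨hp, hps⟩ := List.cons.inj h
      simp only [List.foldl_cons, pvStepA, if_neg (not_not_intro hc)]
      rw [ih (acc ++ [String.ofList firm]) [] q qs hq]
      simp [← hp, ← hps]
    · simp only [pvSplitF, if_neg hc, hq] at h
      obtain ⟨hp, hps⟩ := List.cons.inj h
      simp only [List.foldl_cons, pvStepA, if_pos hc]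
      rw [ih acc (firm ++ [c]) q qs hq]
      simp [← hp, ← hps]

-- B's zip of shifted cut lists produces the canonical split, prefixed by the pending piece
theorem pvB_zip (R : List String) (W : List Char) :
    ∀ (w : List Char) (k prev : Nat), W.drop k = w → prev ≤ k →
      (List.zip (((prev : Int) - 1) :: pvIdx R k w) (pvIdx R k w ++ [(W.length : Int)])).map
        (fun lohi => String.ofList (PySem.List.slice W (some (lohi.1 + 1)) (some lohi.2)))
      = (pvCons ((W.drop prev).take (k - prev)) (pvSplitF R w)).map String.ofList := by
  intro w
  induction w with
  | nil =>
    intro k prev hdrop hle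
    have hk : W.length ≤ k := by
      by_contra hlt
      have hlt : k < W.length := Nat.lt_of_not_le hlt
      have : W.drop k ≠ [] := by
        simp [List.drop_eq_nil_iff]; omega
      exact this hdrop
    simp only [pvIdx, pvSplitF, pvCons, List.zip_cons_cons, List.zip_nil_left,
      List.map_cons, List.map_nil, List.nil_append, List.append_nil]
    have h1 : (prev : Int) - 1 + 1 = ((prev : Nat) : Int) := by ring
    rw [h1, PySem.List.slice_natCast]
    have h2 : (W.drop prev).take (W.length - prev) = W.drop prev := by
      apply List.take_of_length_le; simp
    have h3 : (W.drop prev).take (k - prev) = W.drop prev := by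
      apply List.take_of_length_le; simp; omega
    rw [h2, h3]
  | cons c cs ih =>
    intro k prev hdrop hle
    have hklt : k < W.length := by
      by_contra hge
      have hge : W.length ≤ k := Nat.le_of_not_lt hge
      rw [List.drop_eq_nil_iff.mpr hge] at hdrop
      simp at hdrop
    have hdrop' : W.drop (k + 1) = cs := by
      have : W.drop (k + 1) = (W.drop k).drop 1 := by
        rw [List.drop_drop]
      rw [this, hdrop]; rfl
    have hWk : W[k]? = some c := by
      have h0 : (W.drop k)[0]? = some c := by rw [hdrop]; rfl
      rw [List.getElem?_drop] at h0
      simpa using h0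
    by_cases hc : String.ofList [c] ∈ R
    · -- separator at position k
      simp only [pvIdx, if_pos hc, List.cons_append, List.zip_cons_cons, List.map_cons]
      have h1 : (prev : Int) - 1 + 1 = ((prev : Nat) : Int) := by ring
      rw [h1, PySem.List.slice_natCast]
      have htail := ih (k + 1) (k + 1) hdrop' (le_refl _)
      have hk1 : ((k + 1 : Nat) : Int) - 1 = (k : Int) := by push_cast; ring
      rw [hk1] at htail
      simp only [Nat.sub_self, List.take_zero] at htail
      rw [htail]
      obtain ⟨q, qs, hq⟩ := List.exists_cons_of_ne_nil (pvSplitF_ne_nil R cs)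
      simp [pvSplitF, if_pos hc, hq, pvCons]
    · -- ordinary character at position k
      simp only [pvIdx, if_neg hc]
      rw [ih (k + 1) prev hdrop' (by omega)]
      obtain ⟨q, qs, hq⟩ := List.exists_cons_of_ne_nil (pvSplitF_ne_nil R cs)
      have hext : (W.drop prev).take (k + 1 - prev) = (W.drop prev).take (k - prev) ++ [c] := by
        have hstep : k + 1 - prev = (k - prev) + 1 := by omega
        rw [hstep, List.take_add_one]
        have : (W.drop prev)[k - prev]? = some c := by
          rw [List.getElem?_drop]
          have : prev + (k - prev) = k := by omega
          rw [this, hWk]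
        simp [this]
      simp [pvSplitF, if_neg hc, hq, pvCons, hext]

-- per-word: B's slicing pass yields the canonical split
theorem pvB_word (R : List String) (W : List Char) :
    (List.zip (-1 :: pvCutPointsB (PySem.Set.ofList R) W) (pvCutPointsB (PySem.Set.ofList R) W ++ [(W.length : Int)])).map
      (fun lohi => String.ofList (PySem.List.slice W (some (lohi.1 + 1)) (some lohi.2)))
    = (pvSplitF R W).map String.ofList := by
  have hcuts : pvCutPointsB (PySem.Set.ofList R) W = pvIdx R 0 W := by
    unfold pvCutPointsB
    exact_mod_cast pvCuts_eq R W 0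
  have h := pvB_zip R W W 0 0 (by simp) (le_refl _)
  rw [hcuts]
  have hm1 : ((0 : Nat) : Int) - 1 = -1 := by norm_num
  rw [hm1] at h
  rw [h]
  obtain ⟨q, qs, hq⟩ := List.exists_cons_of_ne_nil (pvSplitF_ne_nil R W)
  simp [hq, pvCons]

-- both ports, word by word
theorem pv_outer (R : List String) (I : List String) :
    ∀ (acc : List String),
      I.foldl (fun max_firms word =>
          (word.toList.foldl (pvStepA R) (max_firms, ([] : List Char))).1
            ++ [String.ofList (word.toList.foldl (pvStepA R) (max_firms, ([] : List Char))).2]) acc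
        = I.foldl (fun out word =>
            out ++ (List.zip (-1 :: pvCutPointsB (PySem.Set.ofList R) word.toList)
                      (pvCutPointsB (PySem.Set.ofList R) word.toList ++ [PySem.Str.len word])).map
              (fun lohi => String.ofList (PySem.List.slice word.toList (some (lohi.1 + 1)) (some lohi.2)))) acc := by
  induction I with
  | nil => intro acc; rfl
  | cons word ws ih =>
    intro acc
    obtain ⟨p, ps, hp⟩ := List.exists_cons_of_ne_nil (pvSplitF_ne_nil R word.toList)
    simp only [List.foldl_cons]
    rw [ih, pvA_inner R word.toList acc [] p ps hp]
    have hlen : PySem.Str.len word = (word.toList.length : Int) := by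
      simp [PySem.Str.len]
    rw [hlen, pvB_word R word.toList, hp]
    simp

-- ===== VERDICT (by name: the statement is the Claim_ definition above) =====
theorem get_max_firm_subwords_spec : Claim_equal_get_max_firm_subwords := by
  intro I R _
  unfold Spec_get_max_firm_subwords get_max_firm_subwords get_max_firm_subwords_alt
  exact pv_outer R I []
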